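-- pv_equiv track=rewrite | github.com/thealper2/codewars-solutions | 7-kyu/who_is_the_killer.py | killer
-- ===== SOURCE A (Python) =====
-- from collections import defaultdict
--
-- def killer(suspect_info, dead):
--     n = len(dead)
--     suspects = defaultdict(int)
--     for k, v in suspect_info.items():
--         for person in dead:
--             if person in v:
--                 suspects[k] += 1
--
--         if suspects[k] == n:
--             return k
--
--     return None
-- ===== SOURCE B (Python) =====
-- def killer(suspect_info, dead):
--     candidates = set(suspect_info)
--     for person in dead:
--         candidates &= {k for k, v in suspect_info.items() if person in v}
--     for k in suspect_info:
--         if k in candidates: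
--             return k
--     return None
-- ===== Notes on version B (the rewrite author's own statement) =====
-- stated objective: alternative
-- what changed: Instead of counting, per suspect, how many dead people appear in their info-list and comparing to len(dead), B loops over the dead people, intersecting a candidate set of suspect keys with the keys whose list contains each person, then returns the first suspect (in dict order) still a candidate.
import Mathlib
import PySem

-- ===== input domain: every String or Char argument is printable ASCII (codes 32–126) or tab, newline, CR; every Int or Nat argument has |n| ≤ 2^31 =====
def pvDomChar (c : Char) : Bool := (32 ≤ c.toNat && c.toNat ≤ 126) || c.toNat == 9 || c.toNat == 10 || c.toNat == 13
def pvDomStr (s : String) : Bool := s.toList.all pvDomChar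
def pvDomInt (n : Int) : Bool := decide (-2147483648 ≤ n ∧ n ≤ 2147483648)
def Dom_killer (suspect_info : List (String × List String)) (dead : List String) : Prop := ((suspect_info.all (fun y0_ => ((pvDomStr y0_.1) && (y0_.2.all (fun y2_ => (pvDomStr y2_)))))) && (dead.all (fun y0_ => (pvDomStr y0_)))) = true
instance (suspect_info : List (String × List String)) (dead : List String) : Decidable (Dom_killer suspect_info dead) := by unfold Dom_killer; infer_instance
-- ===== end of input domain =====

-- B intersects a set of candidate suspects per dead person instead of counting matches per suspect; alternative decomposition, same cost.


-- ===== PORT A =====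
-- 'suspects[k] += 1' on a defaultdict(int) is insert k (getD k 0 + 1); reading suspects[k] is getD k 0.
def killerLoopA (dead : List String) (n : Int) : List (String × List String) → PySem.Dict String Int → Option String
  | [], _ => none
  | (k, v) :: rest, suspects =>
    let suspects := dead.foldl (fun d person => if v.contains person then d.insert k (d.getD k 0 + 1) else d) suspects
    if suspects.getD k 0 == n then some k else killerLoopA dead n rest suspects

def killer (suspect_info : List (String × List String)) (dead : List String) : Option String :=
  let n : Int := dead.length
  killerLoopA dead n suspect_info PySem.Dict.empty

-- ===== PORT B =====
def killer_alt (suspect_info : List (String × List String)) (dead : List String) : Option String :=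
  let cand0 : PySem.Set String := PySem.Set.ofList (suspect_info.map Prod.fst)
  let cand : PySem.Set String := dead.foldl
    (fun c person => PySem.Set.inter c
      (PySem.Set.ofList ((suspect_info.filter (fun kv => kv.2.contains person)).map Prod.fst))) cand0
  (suspect_info.find? (fun kv => PySem.Set.contains cand kv.1)).map Prod.fst

-- ===== PRECONDITION & SPEC =====
-- Python's suspect_info is a dict, whose keys are distinct by construction; association lists with
-- duplicate keys do not correspond to any Python input, so they are excluded.
def Pre_killer (suspect_info : List (String × List String)) (dead : List String) : Prop :=
  (suspect_info.map Prod.fst).Nodup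
instance (suspect_info : List (String × List String)) (dead : List String) : Decidable (Pre_killer suspect_info dead) := by unfold Pre_killer; infer_instance

def pvWitness_killer : (List (String × List String)) × List String :=
  ([("alice", ["bob", "carl"]), ("dan", ["bob"])], ["bob", "carl"])

def Spec_killer (suspect_info : List (String × List String)) (dead : List String) (out : Option String) : Prop := out = killer_alt suspect_info dead
instance (suspect_info : List (String × List String)) (dead : List String) (out : Option String) : Decidable (Spec_killer suspect_info dead out) := by unfold Spec_killer; infer_instance

-- ===== CLAIM (what is proved, stated in full; the proofs are below) =====
def Claim_equal_killer : Prop := ∀ (suspect_info : List (String × List String)) (dead : List String), Dom_killer suspect_info dead → Pre_killer suspect_info dead → Spec_killer suspect_info dead (killer suspect_info dead)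

-- ===== LEMMAS AND PROOFS =====

-- find? only looks at members (used to compare the two final scans pointwise)
theorem find?_congr_mem {α : Type} (l : List α) (p q : α → Bool) (h : ∀ x ∈ l, p x = q x) :
    l.find? p = l.find? q := by
  induction l with
  | nil => rfl
  | cons x t ih =>
    simp only [List.find?_cons]
    rw [h x (List.mem_cons_self)]
    cases q x
    · exact ih (fun y hy => h y (List.mem_cons_of_mem _ hy))
    · rfl

-- the inner counting loop of A, at the key it counts
theorem countLoop_getD_self (k : String) (v : List String) (dead : List String)
    (d : PySem.Dict String Int) :
    (dead.foldl (fun d person => if v.contains person then d.insert k (d.getD k 0 + 1) else d) d).getD k 0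
      = d.getD k 0 + (dead.countP (fun p => v.contains p) : Int) := by
  induction dead generalizing d with
  | nil => simp
  | cons p rest ih =>
    simp only [List.foldl_cons, List.countP_cons]
    by_cases hp : p ∈ v
    · rw [if_pos (by simpa using hp), ih, PySem.Dict.getD_insert_self]
      simp only [List.contains_eq_mem, hp, decide_true, if_pos]
      push_cast
      ring
    · rw [if_neg (by simpa using hp), ih]
      simp [hp]

-- the inner counting loop of A leaves other keys alone
theorem countLoop_getD_ne (k k' : String) (hne : k' ≠ k) (v : List String) (dead : List String)
    (d : PySem.Dict String Int) :
    (dead.foldl (fun d person => if v.contains person then d.insert k (d.getD k 0 + 1) else d) d).getD k' 0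
      = d.getD k' 0 := by
  induction dead generalizing d with
  | nil => simp
  | cons p rest ih =>
    simp only [List.foldl_cons]
    by_cases hp : p ∈ v
    · rw [if_pos (by simpa using hp), ih, PySem.Dict.getD_insert, if_neg hne]
    · rw [if_neg (by simpa using hp), ih]

-- A's outer loop, characterized as a find? over suspects, under distinct keys and fresh counters
theorem killerLoopA_eq_find (dead : List String) (rest : List (String × List String))
    (d : PySem.Dict String Int)
    (hnd : (rest.map Prod.fst).Nodup)
    (hfresh : ∀ kv ∈ rest, d.getD kv.1 0 = 0) :
    killerLoopA dead (dead.length : Int) rest d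
      = (rest.find? (fun kv => dead.all (fun p => kv.2.contains p))).map Prod.fst := by
  induction rest generalizing d with
  | nil => simp [killerLoopA]
  | cons kv rest ih =>
    obtain ⟨k, v⟩ := kv
    simp only [killerLoopA]
    have hk0 : d.getD k 0 = 0 := hfresh (k, v) (List.mem_cons_self)
    have hcount := countLoop_getD_self k v dead d
    rw [hk0, zero_add] at hcount
    simp only [List.map_cons, List.nodup_cons] at hnd
    have hcond : ((dead.foldl (fun d person => if v.contains person then d.insert k (d.getD k 0 + 1) else d) d).getD k 0 == (dead.length : Int))
        = dead.all (fun p => v.contains p) := by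
      rw [hcount]
      by_cases hall : ∀ p ∈ dead, p ∈ v
      · have hc : dead.countP (fun p => v.contains p) = dead.length :=
          List.countP_eq_length.mpr (by simpa using hall)
        rw [hc]
        symm
        simp only [List.all_eq_true, List.contains_eq_mem, decide_eq_true_eq, beq_self_eq_true]
        exact hall
      · have hle : dead.countP (fun p => v.contains p) ≤ dead.length := List.countP_le_length
        have hnee : dead.countP (fun p => v.contains p) ≠ dead.length := by
          intro he
          exact hall (by simpa using List.countP_eq_length.mp he)
        have hInt : ((dead.countP (fun p => v.contains p) : Int) == (dead.length : Int)) = false := by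
          simp only [beq_eq_false_iff_ne, ne_eq, Int.natCast_inj]
          exact hnee
        rw [hInt]
        have hfalse : ¬ (dead.all (fun p => v.contains p) = true) := by
          simpa [List.all_eq_true] using hall
        exact (Bool.eq_false_iff.mpr hfalse).symm
    rw [hcond]
    simp only [List.find?_cons]
    cases hall : dead.all (fun p => v.contains p) with
    | true => simp
    | false =>
      simp only [Bool.false_eq_true, if_false]
      apply ih
      · exact hnd.2
      · intro kw hkw
        have hne : kw.1 ≠ k := by
          intro he
          exact hnd.1 (he ▸ List.mem_map_of_mem hkw)
        rw [countLoop_getD_ne k kw.1 hne]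
        exact hfresh kw (List.mem_cons_of_mem _ hkw)

-- membership in B's intersection fold
theorem candFold_mem (si : List (String × List String)) (dead : List String)
    (c0 : PySem.Set String) (x : String) :
    x ∈ dead.foldl
      (fun c person => PySem.Set.inter c
        (PySem.Set.ofList ((si.filter (fun kv => kv.2.contains person)).map Prod.fst))) c0
      ↔ x ∈ c0 ∧ ∀ p ∈ dead, x ∈ (si.filter (fun kv => kv.2.contains p)).map Prod.fst := by
  induction dead generalizing c0 with
  | nil => simp
  | cons p rest ih =>
    simp only [List.foldl_cons]
    rw [ih, PySem.Set.mem_inter, PySem.Set.mem_ofList]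
    constructor
    · rintro ⟨⟨h0, hp⟩, hrest⟩
      refine ⟨h0, fun q hq => ?_⟩
      rcases List.mem_cons.mp hq with rfl | hq'
      · exact hp
      · exact hrest q hq'
    · rintro ⟨h0, hall⟩
      exact ⟨⟨h0, hall p (List.mem_cons_self)⟩, fun q hq => hall q (List.mem_cons_of_mem _ hq)⟩

-- under distinct keys, membership of a present key in the filtered key list is the filter test
theorem mem_filter_keys_iff (si : List (String × List String))
    (hnd : (si.map Prod.fst).Nodup) (kv : String × List String) (hin : kv ∈ si)
    (q : (String × List String) → Bool) :
    kv.1 ∈ (si.filter q).map Prod.fst ↔ q kv = true := by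
  constructor
  · intro h
    rcases List.mem_map.mp h with ⟨kw, hkw, hfst⟩
    rcases List.mem_filter.mp hkw with ⟨hkwsi, hq⟩
    have : kw = kv := List.inj_on_of_nodup_map hnd hkwsi hin hfst
    exact this ▸ hq
  · intro h
    exact List.mem_map_of_mem (List.mem_filter.mpr ⟨hin, h⟩)

-- ===== VERDICT (by name: the statement is the Claim_ definition above) =====
theorem killer_spec : Claim_equal_killer := by
  intro si dead _ hpre
  unfold Spec_killer killer killer_alt
  rw [killerLoopA_eq_find dead si PySem.Dict.empty hpre (fun kv _ => by simp)]
  congr 1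
  apply find?_congr_mem
  intro kv hkv
  have hmem : (PySem.Set.contains (dead.foldl
      (fun c person => PySem.Set.inter c
        (PySem.Set.ofList ((si.filter (fun kw => kw.2.contains person)).map Prod.fst)))
      (PySem.Set.ofList (si.map Prod.fst))) kv.1)
      = dead.all (fun p => kv.2.contains p) := by
    by_cases hall : dead.all (fun p => kv.2.contains p)
    · rw [hall, PySem.Set.contains_iff, candFold_mem, PySem.Set.mem_ofList]
      refine ⟨List.mem_map_of_mem hkv, fun p hp => ?_⟩
      rw [mem_filter_keys_iff si hpre kv hkv]
      exact (List.all_eq_true.mp hall) p hp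
    · rw [Bool.eq_false_iff.mpr hall, Bool.eq_false_iff]
      intro hc
      rw [PySem.Set.contains_iff, candFold_mem] at hc
      apply hall
      rw [List.all_eq_true]
      intro p hp
      exact (mem_filter_keys_iff si hpre kv hkv _).mp (hc.2 p hp)
  exact hmem.symm
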